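-- pv_equiv track=rewrite | github.com/rddspatial/Insurance-Claim-Orchestrator-using-IBM-Watsonx-Orchestrate | main.py | getNER_FM
-- ===== SOURCE A (Python) =====
-- def getNER_FM(ner_str):
--     car = ''
--     loc = ''
--     date = ''
--     time = ''
--     if len(ner_str) > 0:
--         ner_arr = ner_str.split(';')
--         for ner in ner_arr:
--             if '=' in ner:
--                 entity_arr = ner.split('=')
--                 if entity_arr[0].strip() == 'Car':
--                     car = entity_arr[1].strip()
--                 if entity_arr[0].strip() == 'Location':
--                     loc = entity_arr[1].strip()
--                 if entity_arr[0].strip() == 'Date':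
--                     date = entity_arr[1].strip()
--                 if entity_arr[0].strip() == 'Time':
--                     time = entity_arr[1].strip()
--     return car, loc, date, time
-- ===== SOURCE B (Python) =====
-- def getNER_FM(ner_str):
--     # Key-directed search: for each field independently, scan the segments
--     # back to front and return the first (i.e. last-written) matching value.
--     def last_value(key):
--         for seg in reversed(ner_str.split(';')):
--             if '=' in seg:
--                 parts = seg.split('=')
--                 if parts[0].strip() == key:
--                     return parts[1].strip()
--         return ''
--     return (last_value('Car'), last_value('Location'),
--             last_value('Date'), last_value('Time'))
-- ===== Notes on version B (the rewrite author's own statement) =====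
-- stated objective: alternative
-- what changed: B replaces A's single forward pass with a 4-tuple accumulator by four independent key-directed backward searches with early exit: each field is found as the first match in the reversed segment list (= A's last write), with no accumulator state at all.
import Mathlib
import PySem

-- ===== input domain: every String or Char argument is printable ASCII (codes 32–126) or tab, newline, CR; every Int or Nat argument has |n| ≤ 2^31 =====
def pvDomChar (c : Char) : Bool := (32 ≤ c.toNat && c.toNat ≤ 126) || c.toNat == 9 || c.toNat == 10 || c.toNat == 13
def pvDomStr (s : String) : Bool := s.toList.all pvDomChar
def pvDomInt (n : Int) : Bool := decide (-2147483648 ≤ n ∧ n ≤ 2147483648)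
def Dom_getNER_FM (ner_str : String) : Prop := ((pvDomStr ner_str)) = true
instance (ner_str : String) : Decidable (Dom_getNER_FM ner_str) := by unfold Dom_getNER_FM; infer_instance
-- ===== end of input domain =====

-- B replaces A's single forward pass with a stateful 4-tuple accumulator by four
-- independent key-directed backward searches with early exit (first match in the
-- reversed segment list = A's last write). Same return value on every string.

-- ===== PORT A =====
-- strings handled on the List Char side (PySem.Chars, the definitions behind PySem.Str)
def getNER_FM (ner_str : String) : String × String × String × String :=
  let init : String × String × String × String := ("", "", "", "")
  if 0 < PySem.Str.len ner_str then
    (PySem.Chars.splitOn ner_str.toList [';']).foldl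
      (fun st ner =>
        if PySem.Chars.isIn ['='] ner then
          let ea := PySem.Chars.splitOn ner ['=']
          let k := String.ofList (PySem.Chars.strip (PySem.List.pyGetD ea 0 []))
          let v := String.ofList (PySem.Chars.strip (PySem.List.pyGetD ea 1 []))
          let st := if k = "Car" then (v, st.2.1, st.2.2.1, st.2.2.2) else st
          let st := if k = "Location" then (st.1, v, st.2.2.1, st.2.2.2) else st
          let st := if k = "Date" then (st.1, st.2.1, v, st.2.2.2) else st
          let st := if k = "Time" then (st.1, st.2.1, st.2.2.1, v) else st
          st
        else st) init
  else init

-- ===== PORT B =====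
-- per-segment test: does this segment carry 'key = value' for the given key?
def pvScan1 (key : String) (seg : List Char) : Option String :=
  if PySem.Chars.isIn ['='] seg then
    let parts := PySem.Chars.splitOn seg ['=']
    if String.ofList (PySem.Chars.strip (PySem.List.pyGetD parts 0 [])) = key then
      some (String.ofList (PySem.Chars.strip (PySem.List.pyGetD parts 1 [])))
    else none
  else none

-- B's 'for seg in reversed(...): ... return ...' loop: first match or none
def pvScanR (key : String) : List (List Char) → Option String
  | [] => none
  | seg :: rest =>
    match pvScan1 key seg with
    | some v => some v
    | none => pvScanR key rest

def getNER_FM_alt (ner_str : String) : String × String × String × String :=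
  let segs := (PySem.Chars.splitOn ner_str.toList [';']).reverse
  ((pvScanR "Car" segs).getD "", (pvScanR "Location" segs).getD "",
   (pvScanR "Date" segs).getD "", (pvScanR "Time" segs).getD "")

-- ===== PRECONDITION & SPEC =====
def Spec_getNER_FM (ner_str : String) (out : String × String × String × String) : Prop := out = getNER_FM_alt ner_str
instance (ner_str : String) (out : String × String × String × String) : Decidable (Spec_getNER_FM ner_str out) := by unfold Spec_getNER_FM; infer_instance

-- ===== CLAIM =====
def Claim_equal_getNER_FM : Prop := ∀ (ner_str : String), Dom_getNER_FM ner_str → Spec_getNER_FM ner_str (getNER_FM ner_str)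

-- ===== LEMMAS AND PROOFS =====

def pvStepA (st : String × String × String × String) (ner : List Char) :
    String × String × String × String :=
  if PySem.Chars.isIn ['='] ner then
    let ea := PySem.Chars.splitOn ner ['=']
    let k := String.ofList (PySem.Chars.strip (PySem.List.pyGetD ea 0 []))
    let v := String.ofList (PySem.Chars.strip (PySem.List.pyGetD ea 1 []))
    let st := if k = "Car" then (v, st.2.1, st.2.2.1, st.2.2.2) else st
    let st := if k = "Location" then (st.1, v, st.2.2.1, st.2.2.2) else st
    let st := if k = "Date" then (st.1, st.2.1, v, st.2.2.2) else st
    let st := if k = "Time" then (st.1, st.2.1, st.2.2.1, v) else st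
    st
  else st

lemma pvScanR_append (key : String) (l r : List (List Char)) :
    pvScanR key (l ++ r) =
      match pvScanR key l with
      | some v => some v
      | none => pvScanR key r := by
  induction l with
  | nil => rfl
  | cons s t ih =>
    simp only [List.cons_append, pvScanR, ih]
    cases pvScan1 key s <;> rfl

lemma pvStepA_proj (st : String × String × String × String) (seg : List Char) :
    pvStepA st seg =
      ((pvScan1 "Car" seg).getD st.1, (pvScan1 "Location" seg).getD st.2.1,
       (pvScan1 "Date" seg).getD st.2.2.1, (pvScan1 "Time" seg).getD st.2.2.2) := by
  unfold pvStepA pvScan1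
  by_cases h : PySem.Chars.isIn ['='] seg = true
  · simp only [if_pos h]
    generalize String.ofList (PySem.Chars.strip (PySem.List.pyGetD (PySem.Chars.splitOn seg ['=']) 0 [])) = k
    by_cases h1 : k = "Car"
    · subst h1; simp
    by_cases h2 : k = "Location"
    · subst h2; simp
    by_cases h3 : k = "Date"
    · subst h3; simp
    by_cases h4 : k = "Time"
    · subst h4; simp
    simp [h1, h2, h3, h4]
  · simp [h]

lemma pvFoldl_eq_scan (segs : List (List Char)) (st : String × String × String × String) :
    segs.foldl pvStepA st =
      ((pvScanR "Car" segs.reverse).getD st.1,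
       (pvScanR "Location" segs.reverse).getD st.2.1,
       (pvScanR "Date" segs.reverse).getD st.2.2.1,
       (pvScanR "Time" segs.reverse).getD st.2.2.2) := by
  induction segs generalizing st with
  | nil => simp [pvScanR]
  | cons s t ih =>
    simp only [List.foldl_cons, List.reverse_cons, ih, pvStepA_proj, pvScanR_append]
    refine Prod.ext ?_ (Prod.ext ?_ (Prod.ext ?_ ?_)) <;>
      simp only [] <;>
      (cases hc : pvScanR _ t.reverse <;> cases h1 : pvScan1 _ s <;> simp [pvScanR, h1])

-- ===== VERDICT =====
theorem getNER_FM_spec : Claim_equal_getNER_FM := by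
  intro s _
  show getNER_FM s = getNER_FM_alt s
  unfold getNER_FM getNER_FM_alt
  by_cases hpos : 0 < PySem.Str.len s
  · rw [if_pos hpos]
    exact pvFoldl_eq_scan _ _
  · rw [if_neg hpos]
    have hl : s.toList = [] := by
      simp only [PySem.Str.len_eq] at hpos
      exact List.length_eq_zero_iff.mp (by omega)
    rw [hl]
    rfl
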